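-- pv_equiv track=rewrite | github.com/szhen11/tools | ivi/demo_config.py | get_vendor_product
-- ===== SOURCE A (Python) =====
-- def get_vendor_product(input_device):
--     vendor = None
--     product = None
--     if 'Identifier' in input_device:
--         for item in input_device['Identifier'].split(','):
--             si = item.split('=')
--             if len(si) == 2 and si[0].strip() == 'vendor':
--                 vendor = si[1].strip()[2:]
--             elif len(si) == 2 and si[0].strip() == 'product':
--                 product = si[1].strip()[2:]
--     return (vendor, product)
-- ===== SOURCE B (Python) =====
-- def _find(parts, key):
--     for item in reversed(parts):
--         kv = item.split('=')
--         if len(kv) == 2 and kv[0].strip() == key: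
--             return kv[1].strip()[2:]
--     return None
--
-- def get_vendor_product(input_device):
--     if 'Identifier' not in input_device:
--         return (None, None)
--     parts = input_device['Identifier'].split(',')
--     return (_find(parts, 'vendor'), _find(parts, 'product'))
-- ===== Notes on version B (the rewrite author's own statement) =====
-- stated objective: alternative
-- what changed: Replaces A's single forward pass with an if/elif overwrite accumulator by two independent backward scans that early-return the first match from the end (first-match-in-reverse equals last-wins-forward), applying the strip/[2:] at the return site.
import Mathlib
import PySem

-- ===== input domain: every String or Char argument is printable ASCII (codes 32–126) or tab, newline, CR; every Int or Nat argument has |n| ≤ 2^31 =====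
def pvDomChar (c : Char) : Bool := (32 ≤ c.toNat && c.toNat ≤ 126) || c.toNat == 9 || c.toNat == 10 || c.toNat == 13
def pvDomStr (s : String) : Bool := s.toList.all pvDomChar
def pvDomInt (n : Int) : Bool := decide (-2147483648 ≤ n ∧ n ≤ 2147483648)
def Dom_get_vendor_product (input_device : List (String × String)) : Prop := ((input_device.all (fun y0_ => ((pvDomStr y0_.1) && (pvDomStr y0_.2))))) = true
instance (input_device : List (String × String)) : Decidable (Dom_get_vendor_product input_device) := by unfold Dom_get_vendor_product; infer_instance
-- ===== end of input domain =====

-- B replaces A's forward accumulator pass by two independent backward first-match scans (alternative decomposition, same cost).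

-- s.split(sep) for a nonempty literal sep (Str.split? is none only for sep = "")
def pvSplit (s sep : String) : List String := (PySem.Str.split? s sep).getD []

-- shared input access: `'Identifier' in input_device` + `input_device['Identifier']` (first match, per assoc-list convention)
def pvAssocGet (d : List (String × String)) (k : String) : Option String :=
  (d.find? (fun p => p.1 == k)).map (·.2)

-- ===== PORT A =====
def pvStepA (st : Option String × Option String) (item : String) : Option String × Option String :=
  match pvSplit item "=" with
  | [k, v] =>
    if PySem.Str.strip k == "vendor" then
      (some (PySem.Str.slice (PySem.Str.strip v) (some 2) none), st.2)
    else if PySem.Str.strip k == "product" then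
      (st.1, some (PySem.Str.slice (PySem.Str.strip v) (some 2) none))
    else st
  | _ => st

def get_vendor_product (input_device : List (String × String)) : Option String × Option String :=
  match pvAssocGet input_device "Identifier" with
  | none => (none, none)
  | some ident => (pvSplit ident ",").foldl pvStepA (none, none)

-- ===== PORT B =====
-- _find: loop over reversed(parts) with early return on the first len==2 item whose stripped key matches
def pvFind (key : String) : List String → Option String
  | [] => none
  | item :: rest =>
    match pvSplit item "=" with
    | [k, v] =>
      if PySem.Str.strip k == key then some (PySem.Str.slice (PySem.Str.strip v) (some 2) none)
      else pvFind key rest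
    | _ => pvFind key rest

def get_vendor_product_alt (input_device : List (String × String)) : Option String × Option String :=
  match pvAssocGet input_device "Identifier" with
  | none => (none, none)
  | some ident =>
    let parts := pvSplit ident ","
    (pvFind "vendor" parts.reverse, pvFind "product" parts.reverse)

-- ===== PRECONDITION & SPEC =====
def Spec_get_vendor_product (input_device : List (String × String)) (out : Option String × Option String) : Prop := out = get_vendor_product_alt input_device
instance (input_device : List (String × String)) (out : Option String × Option String) : Decidable (Spec_get_vendor_product input_device out) := by unfold Spec_get_vendor_product; infer_instance

-- ===== CLAIM (what is proved, stated in full; the proofs are below) =====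
def Claim_equal_get_vendor_product : Prop := ∀ (input_device : List (String × String)), Dom_get_vendor_product input_device → Spec_get_vendor_product input_device (get_vendor_product input_device)

-- ===== LEMMAS AND PROOFS =====

theorem pvFind_append (key : String) (l1 l2 : List String) :
    pvFind key (l1 ++ l2) = (pvFind key l1).or (pvFind key l2) := by
  induction l1 with
  | nil => rfl
  | cons x xs ih =>
    simp only [List.cons_append, pvFind]
    cases h : pvSplit x "=" with
    | nil => exact ih
    | cons k t =>
      cases t with
      | nil => exact ih
      | cons v t2 =>
        cases t2 with
        | nil =>
          by_cases hk : PySem.Str.strip k == key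
          · simp [hk]
          · simp [hk, ih]
        | cons _ _ => exact ih

theorem pvStepA_eq_find (st : Option String × Option String) (x : String) :
    pvStepA st x = ((pvFind "vendor" [x]).or st.1, (pvFind "product" [x]).or st.2) := by
  unfold pvStepA pvFind
  cases h : pvSplit x "=" with
  | nil => rfl
  | cons k t =>
    cases t with
    | nil => rfl
    | cons v t2 =>
      cases t2 with
      | nil =>
        by_cases hv : PySem.Str.strip k = "vendor"
        · have hp : PySem.Str.strip k ≠ "product" := by simp [hv]
          simp [hv, pvFind]
        · by_cases hp : PySem.Str.strip k = "product"
          · simp [hp, pvFind]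
          · simp [hv, hp, pvFind]
      | cons _ _ => rfl

theorem pvFold_eq_find (items : List String) (st : Option String × Option String) :
    items.foldl pvStepA st =
      ((pvFind "vendor" items.reverse).or st.1, (pvFind "product" items.reverse).or st.2) := by
  induction items generalizing st with
  | nil => simp [pvFind]
  | cons x xs ih =>
    simp only [List.foldl_cons, List.reverse_cons, ih, pvStepA_eq_find, pvFind_append,
      Option.or_assoc]

-- ===== VERDICT (by name: the statement is the Claim_ definition above) =====
theorem get_vendor_product_spec : Claim_equal_get_vendor_product := by
  intro input_device _
  unfold Spec_get_vendor_product get_vendor_product get_vendor_product_alt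
  cases pvAssocGet input_device "Identifier" with
  | none => rfl
  | some ident => simp [pvFold_eq_find]
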